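-- pv_equiv track=rewrite | github.com/alexandraback/datacollection | solutions_5644738749267968_0/Python/gzroger/q4.py | scoreDWar
-- ===== SOURCE A (Python) =====
-- def scoreDWar(N, rgwN, rgwK):
--     rgwN.sort()
--     rgwK.sort()
--     score = 0
--     while rgwK:
--         wKMax = rgwK.pop(-1)
--         wNMax = rgwN[-1]
--         if wNMax < wKMax:
--             #kill
--             rgwN.pop(0)
--         else:
--             #play
--             rgwN.pop(-1)
--             score += 1
--     return score
-- ===== SOURCE B (Python) =====
-- def scoreDWar(N, rgwN, rgwK):
--     # Two-pointer rewrite: sort N ascending once, walk K from its largest card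
--     # down; a win consumes N's current largest (hi), a loss consumes N's
--     # smallest, which never affects the top, so only hi is tracked.
--     # Unlike A, this does not mutate rgwN/rgwK in place.
--     ns = sorted(rgwN)
--     score = 0
--     hi = len(ns) - 1
--     for k in sorted(rgwK, reverse=True):
--         if ns[hi] >= k:
--             hi -= 1
--             score += 1
--     return score
-- ===== Notes on version B (the rewrite author's own statement) =====
-- stated objective: alternative
-- what changed: Replaces the destructive loop with pop(0)/pop(-1) on shrinking lists by a single non-mutating descending pass over sorted K with one index hi into sorted N, observing that losses only discard N's minimum and never change its maximum.
import Mathlib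
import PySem

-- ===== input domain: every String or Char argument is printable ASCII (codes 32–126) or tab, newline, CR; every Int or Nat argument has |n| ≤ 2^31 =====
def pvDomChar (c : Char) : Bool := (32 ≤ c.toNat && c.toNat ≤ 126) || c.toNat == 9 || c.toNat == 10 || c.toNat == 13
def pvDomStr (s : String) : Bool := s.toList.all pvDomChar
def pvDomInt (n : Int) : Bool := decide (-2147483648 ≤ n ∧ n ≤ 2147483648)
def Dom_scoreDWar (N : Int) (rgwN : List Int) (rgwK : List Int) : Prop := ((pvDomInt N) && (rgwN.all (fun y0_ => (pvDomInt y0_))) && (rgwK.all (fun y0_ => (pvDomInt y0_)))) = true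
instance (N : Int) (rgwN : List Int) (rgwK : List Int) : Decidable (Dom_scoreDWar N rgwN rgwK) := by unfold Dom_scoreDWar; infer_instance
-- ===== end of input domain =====

-- B replaces A's destructive pop(0)/pop(-1) loop by one descending pass over sorted K
-- with a single index into sorted N (A mutates its list arguments; B does not —
-- the equivalence proved here is about the return value).


-- ===== PORT A =====
-- the while loop: pop K's max; if N's max is smaller, discard N's min, else discard N's max and score
def warLoopA (rgwN : List Int) (rgwK : List Int) (score : Int) : Int :=
  match hk : PySem.List.pop? rgwK (-1) with
  | none => score                -- `while rgwK` false: rgwK empty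
  | some (wKMax, rgwK') =>
    match PySem.List.pyGet? rgwN (-1) with
    | none => score              -- rgwN[-1] IndexError; excluded by Pre_
    | some wNMax =>
      if wNMax < wKMax then
        match PySem.List.pop? rgwN 0 with
        | none => score          -- IndexError; excluded by Pre_
        | some (_, rgwN') => warLoopA rgwN' rgwK' score
      else
        match PySem.List.pop? rgwN (-1) with
        | none => score          -- IndexError; excluded by Pre_
        | some (_, rgwN') => warLoopA rgwN' rgwK' (score + 1)
termination_by rgwK.length
decreasing_by
  all_goals have := PySem.List.length_of_pop?_eq_some rgwK hk; simp at this; omega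

def scoreDWar (N : Int) (rgwN : List Int) (rgwK : List Int) : Int :=
  warLoopA (PySem.List.sorted rgwN id false) (PySem.List.sorted rgwK id false) 0

-- ===== PORT B =====
-- for k in sorted(rgwK, reverse=True): if ns[hi] >= k: hi -= 1; score += 1
def warLoopB (ns : List Int) (ks : List Int) (score : Int) (hi : Int) : Int :=
  match ks with
  | [] => score
  | k :: rest =>
    match PySem.List.pyGet? ns hi with
    | none => score              -- ns[hi] IndexError; excluded by Pre_
    | some v =>
      if v ≥ k then warLoopB ns rest (score + 1) (hi - 1)
      else warLoopB ns rest score hi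

def scoreDWar_alt (N : Int) (rgwN : List Int) (rgwK : List Int) : Int :=
  let ns := PySem.List.sorted rgwN id false
  warLoopB ns (PySem.List.sorted rgwK id true) 0 ((ns.length : Int) - 1)

-- ===== PRECONDITION & SPEC =====
-- Pre_ excludes exactly the inputs where A raises IndexError: when the K hand is
-- longer than the N hand, A's loop exhausts rgwN and rgwN[-1] (or pop) fails.
def Pre_scoreDWar (N : Int) (rgwN : List Int) (rgwK : List Int) : Prop :=
  rgwK.length ≤ rgwN.length
instance (N : Int) (rgwN : List Int) (rgwK : List Int) : Decidable (Pre_scoreDWar N rgwN rgwK) := by unfold Pre_scoreDWar; infer_instance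

def pvWitness_scoreDWar : Int × List Int × List Int := (3, [1, 2, 3], [2, 2])

def Spec_scoreDWar (N : Int) (rgwN : List Int) (rgwK : List Int) (out : Int) : Prop := out = scoreDWar_alt N rgwN rgwK
instance (N : Int) (rgwN : List Int) (rgwK : List Int) (out : Int) : Decidable (Spec_scoreDWar N rgwN rgwK out) := by unfold Spec_scoreDWar; infer_instance

-- ===== CLAIM (what is proved, stated in full; the proofs are below) =====
def Claim_equal_scoreDWar : Prop := ∀ (N : Int) (rgwN : List Int) (rgwK : List Int), Dom_scoreDWar N rgwN rgwK → Pre_scoreDWar N rgwN rgwK → Spec_scoreDWar N rgwN rgwK (scoreDWar N rgwN rgwK)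

-- ===== LEMMAS AND PROOFS =====

-- A's loop, recursing structurally over the K hand already reversed (largest first)
def warLoopA2 (n : List Int) (ks : List Int) (s : Int) : Int :=
  match ks with
  | [] => s
  | k :: rest =>
    match PySem.List.pyGet? n (-1) with
    | none => s
    | some wN =>
      if wN < k then
        match PySem.List.pop? n 0 with
        | none => s
        | some (_, n') => warLoopA2 n' rest s
      else
        match PySem.List.pop? n (-1) with
        | none => s
        | some (_, n') => warLoopA2 n' rest (s + 1)

lemma warLoopA_eq_A2 (ks : List Int) : ∀ (n : List Int) (s : Int),
    warLoopA n ks s = warLoopA2 n ks.reverse s := by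
  induction ks using List.reverseRecOn with
  | nil =>
    intro n s
    rw [warLoopA]
    split
    · rfl
    · next p heq => simp [PySem.List.pop?, PySem.List.pyIdx?] at heq
  | append_singleton xs x ih =>
    intro n s
    rw [warLoopA]
    split
    · next heq => rw [PySem.List.pop?_last] at heq; exact absurd heq (by simp)
    · next wK k' heq =>
      rw [PySem.List.pop?_last] at heq
      obtain ⟨rfl, rfl⟩ : x = wK ∧ xs = k' := by
        simpa [Prod.ext_iff] using heq
      simp only [List.reverse_append, List.reverse_singleton, List.singleton_append, warLoopA2]
      cases hg : PySem.List.pyGet? n (-1) with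
      | none => rfl
      | some wN =>
        dsimp only
        split_ifs with hlt
        · cases hp : PySem.List.pop? n 0 with
          | none => rfl
          | some r => exact ih r.2 s
        · cases hp : PySem.List.pop? n (-1) with
          | none => rfl
          | some r => exact ih r.2 (s + 1)

-- the element at global index pre.length + init.length of pre ++ (init ++ [last]) ++ suf
lemma pyGet?_middle_last (pre init suf : List Int) (last : Int) :
    PySem.List.pyGet? (pre ++ (init ++ [last]) ++ suf)
      ((pre.length : Int) + (init.length + 1) - 1) = some last := by
  have hidx : ((pre.length : Int) + (init.length + 1) - 1)
      = ((pre.length + init.length : Nat) : Int) := by push_cast; ring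
  rw [hidx, PySem.List.pyGet?_natCast]
  rw [show pre ++ (init ++ [last]) ++ suf = (pre ++ init) ++ ([last] ++ suf) by
    simp [List.append_assoc]]
  rw [List.getElem?_append_right (by simp)]
  simp

-- invariant: A's current N hand is a contiguous slice `cur` of the fixed sorted
-- list; B reads its last element at index pre.length + cur.length - 1
lemma warA2_eq_B (ks : List Int) : ∀ (pre cur suf : List Int) (s : Int),
    ks.length ≤ cur.length →
    warLoopA2 cur ks s
      = warLoopB (pre ++ cur ++ suf) ks s ((pre.length : Int) + cur.length - 1) := by
  induction ks with
  | nil => intro pre cur suf s _; rfl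
  | cons k rest ih =>
    intro pre cur suf s hlen
    cases cur with
    | nil => simp at hlen
    | cons c cs =>
      have hne : c :: cs ≠ [] := by simp
      set last := (c :: cs).getLast hne with hlast
      set init := (c :: cs).dropLast with hinit
      have hsplit : c :: cs = init ++ [last] := (List.dropLast_append_getLast hne).symm
      have hil : init.length = cs.length := by
        have := congrArg List.length hsplit
        simp at this; omega
      have hgA : PySem.List.pyGet? (c :: cs) (-1) = some last := by
        rw [PySem.List.pyGet?_neg_one, hsplit]; simp
      have hgB : PySem.List.pyGet? (pre ++ (c :: cs) ++ suf)
          ((pre.length : Int) + (c :: cs).length - 1) = some last := by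
        rw [hsplit]
        have : ((init ++ [last]).length : Int) = (init.length : Int) + 1 := by simp
        rw [this]
        exact pyGet?_middle_last pre init suf last
      rw [warLoopA2, warLoopB, hgA, hgB]
      dsimp only
      by_cases hlt : last < k
      · rw [if_pos hlt, if_neg (by omega), PySem.List.pop?_zero_cons]
        dsimp only
        have := ih (pre ++ [c]) cs suf s (by simp at hlen ⊢; omega)
        rw [this]
        congr 1 <;> simp [List.append_assoc] <;> ring
      · rw [if_neg hlt, if_pos (by omega)]
        conv_lhs => rw [hsplit]
        rw [PySem.List.pop?_last]
        dsimp only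
        have := ih pre init (last :: suf) (s + 1) (by simp at hlen ⊢; omega)
        rw [this]
        congr 1
        · rw [hsplit]; simp [List.append_assoc]
        · simp [hil]; ring

lemma descending_eq_reverse (xs : List Int) :
    PySem.List.sorted xs id true = (PySem.List.sorted xs id false).reverse := by
  apply List.Perm.eq_of_pairwise (le := fun a b : Int => b ≤ a)
  · exact fun a b _ _ h1 h2 => le_antisymm h2 h1
  · exact PySem.List.sorted_pairwise_rev xs id
  · exact (List.pairwise_reverse).mpr (PySem.List.sorted_pairwise xs id)
  · exact (PySem.List.sorted_perm xs id true).trans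
      ((PySem.List.sorted_perm xs id false).symm.trans (List.reverse_perm _).symm)

-- ===== VERDICT (by name: the statement is the Claim_ definition above) =====
theorem scoreDWar_spec : Claim_equal_scoreDWar := by
  intro N rgwN rgwK _ hpre
  unfold Spec_scoreDWar scoreDWar scoreDWar_alt
  rw [warLoopA_eq_A2, descending_eq_reverse]
  have h := warA2_eq_B (PySem.List.sorted rgwK id false).reverse
    [] (PySem.List.sorted rgwN id false) [] 0
    (by simp [PySem.List.length_sorted]; exact hpre)
  simpa using h
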